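-- pv_equiv track=rewrite | github.com/wbglaeser/cplayground | PyPlayground/sherlockCost/2.py | costD
-- ===== SOURCE A (Python) =====
-- def costD(B, A_prev=0, i=-1, cost=0):
--
--     if A_prev != 0:
--         costa = cost + abs(B[i] - A_prev)
--         costb = cost + abs(1-A_prev)
--
--     else:
--         costa, costb = 0, 0
--
--     B_prev_M = B[i]
--     B_prev_L = 1
--
--     if i == -len(B): return max(costa, costb)
--
--     return max(
--         costD(B, B_prev_M, i-1, costa),
--         costD(B, B_prev_L, i-1, costb),
--     )
-- ===== SOURCE B (Python) =====
-- def costD(B, A_prev=0, i=-1, cost=0):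
--     # One O(n) pass: hi/lo = best accumulated cost so far with the current
--     # element chosen as B[j] resp. as 1.
--     if A_prev == 0:
--         hi = lo = 0
--     else:
--         hi = cost + abs(B[i] - A_prev)
--         lo = cost + abs(1 - A_prev)
--     for j in range(i, -len(B), -1):
--         hi, lo = max(hi + abs(B[j - 1] - B[j]), lo + abs(B[j - 1] - 1)), \
--                  max(hi + abs(1 - B[j]), lo)
--     return max(hi, lo)
-- ===== Notes on version B (the rewrite author's own statement) =====
-- stated objective: faster
-- what changed: Replaced A's exponential two-way recursion by a single O(n) pass carrying two scalars (best cost with the current element chosen as B[j] vs as 1); Pre_ excludes out-of-range i (A raises IndexError) and inputs with a 0 element in the scanned range, a corner where the data value 0 is indistinguishable from A's A_prev==0 'no previous element' sentinel, so A restarts cost accumulation there while B treats 0 as an ordinary value.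
-- outside the precondition, e.g. on costD([5, 0], 0, -1, 0): A returns 4, B returns 5
import Mathlib
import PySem

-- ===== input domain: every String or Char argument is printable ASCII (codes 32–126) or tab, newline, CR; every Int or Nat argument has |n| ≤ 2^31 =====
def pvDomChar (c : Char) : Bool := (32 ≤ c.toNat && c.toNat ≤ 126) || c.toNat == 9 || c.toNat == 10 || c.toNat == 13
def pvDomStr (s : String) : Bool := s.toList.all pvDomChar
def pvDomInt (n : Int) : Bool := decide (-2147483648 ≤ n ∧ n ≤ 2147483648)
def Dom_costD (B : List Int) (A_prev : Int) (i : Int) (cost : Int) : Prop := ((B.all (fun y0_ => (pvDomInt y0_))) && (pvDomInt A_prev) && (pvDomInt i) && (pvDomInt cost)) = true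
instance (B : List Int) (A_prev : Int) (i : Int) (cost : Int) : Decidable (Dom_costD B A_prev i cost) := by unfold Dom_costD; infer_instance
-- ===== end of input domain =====

-- B replaces A's exponential two-way recursion by one O(n) pass over two scalars (intended as faster; a timing run saw A time out where B returned, but too few large inputs finished to confirm a ratio).


-- ===== PORT A =====
-- literal port of A; 'none' from pyGet? = Python IndexError (excluded by Pre_costD)
def costD (B : List Int) (A_prev : Int) (i : Int) (cost : Int) : Int :=
  match h : PySem.List.pyGet? B i with
  | none => 0
  | some Bi =>
    let costa : Int := if A_prev ≠ 0 then cost + |Bi - A_prev| else 0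
    let costb : Int := if A_prev ≠ 0 then cost + |1 - A_prev| else 0
    if i = -(B.length : Int) then max costa costb
    else max (costD B Bi (i-1) costa) (costD B 1 (i-1) costb)
termination_by (i + B.length).toNat
decreasing_by
  all_goals
    have hr : PySem.Raise.InRange B.length i := by
      by_contra hc
      simp [(PySem.List.pyGet?_eq_none_iff _ _).mpr hc] at h
    unfold PySem.Raise.InRange at hr
    omega

-- ===== PORT B =====
-- loop body of Source B; state = (hi, lo)
def pvStepB (B : List Int) (st : Int × Int) (j : Int) : Int × Int :=
  let bj1 : Int := (PySem.List.pyGet? B (j - 1)).getD 0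
  let bj : Int := (PySem.List.pyGet? B j).getD 0
  (max (st.1 + |bj1 - bj|) (st.2 + |bj1 - 1|), max (st.1 + |1 - bj|) st.2)

def costD_alt (B : List Int) (A_prev : Int) (i : Int) (cost : Int) : Int :=
  let st0 : Int × Int :=
    if A_prev = 0 then (0, 0)
    else (cost + |(PySem.List.pyGet? B i).getD 0 - A_prev|, cost + |1 - A_prev|)
  let p := (PySem.List.pyRange i (-(B.length : Int)) (-1)).foldl (pvStepB B) st0
  max p.1 p.2

-- ===== PRECONDITION & SPEC =====
-- Pre_ excludes (a) out-of-range i, on which A raises IndexError, and (b) inputs whose scanned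
-- range contains a 0 element, a corner where the data value 0 is indistinguishable from A's
-- A_prev==0 'no previous element' sentinel, so A restarts cost accumulation there while B
-- treats 0 as an ordinary value.
def Pre_costD (B : List Int) (A_prev : Int) (i : Int) (cost : Int) : Prop :=
  (-(B.length : Int) ≤ i ∧ i < (B.length : Int)) ∧
  ∀ j ∈ PySem.List.pyRange (-(B.length : Int) + 1) (i + 1) 1, PySem.List.pyGet? B j ≠ some 0
instance (B : List Int) (A_prev : Int) (i : Int) (cost : Int) : Decidable (Pre_costD B A_prev i cost) := by unfold Pre_costD; infer_instance

def pvWitness_costD : List Int × Int × Int × Int := ([3, 1, 2], 0, -1, 0)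

def Spec_costD (B : List Int) (A_prev : Int) (i : Int) (cost : Int) (out : Int) : Prop := out = costD_alt B A_prev i cost
instance (B : List Int) (A_prev : Int) (i : Int) (cost : Int) (out : Int) : Decidable (Spec_costD B A_prev i cost out) := by unfold Spec_costD; infer_instance

-- ===== CLAIM (what is proved, stated in full; the proofs are below) =====
def Claim_equal_costD : Prop := ∀ (B : List Int) (A_prev : Int) (i : Int) (cost : Int), Dom_costD B A_prev i cost → Pre_costD B A_prev i cost → Spec_costD B A_prev i cost (costD B A_prev i cost)

-- ===== LEMMAS AND PROOFS =====

-- B's pass, started at level j with state st (same computation as costD_alt's tail)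
def pvRun (B : List Int) (j : Int) (st : Int × Int) : Int :=
  let p := (PySem.List.pyRange j (-(B.length : Int)) (-1)).foldl (pvStepB B) st
  max p.1 p.2

theorem pvRun_base (B : List Int) (j : Int) (st : Int × Int) (h : j ≤ -(B.length : Int)) :
    pvRun B j st = max st.1 st.2 := by
  unfold pvRun
  rw [PySem.List.pyRange_neg_one_eq_nil h]
  simp

theorem pvRun_step (B : List Int) (j : Int) (st : Int × Int) (h : -(B.length : Int) < j) :
    pvRun B j st = pvRun B (j - 1) (pvStepB B st j) := by
  unfold pvRun
  rw [PySem.List.pyRange_neg_one_cons h, List.foldl_cons]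

theorem pvFold_max (B : List Int) (L : List Int) :
    ∀ h1 l1 h2 l2 : Int,
      L.foldl (pvStepB B) (max h1 h2, max l1 l2) =
        (max (L.foldl (pvStepB B) (h1, l1)).1 (L.foldl (pvStepB B) (h2, l2)).1,
         max (L.foldl (pvStepB B) (h1, l1)).2 (L.foldl (pvStepB B) (h2, l2)).2) := by
  induction L with
  | nil => intro h1 l1 h2 l2; simp
  | cons j L ih =>
    intro h1 l1 h2 l2
    simp only [List.foldl_cons]
    have hstep : pvStepB B (max h1 h2, max l1 l2) j =
        (max (pvStepB B (h1, l1) j).1 (pvStepB B (h2, l2) j).1,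
         max (pvStepB B (h1, l1) j).2 (pvStepB B (h2, l2) j).2) := by
      simp only [pvStepB, Prod.mk.injEq]
      refine ⟨?_, ?_⟩ <;> omega
    rw [hstep]
    have := ih (pvStepB B (h1, l1) j).1 (pvStepB B (h1, l1) j).2
      (pvStepB B (h2, l2) j).1 (pvStepB B (h2, l2) j).2
    simpa using this

theorem pvRun_max (B : List Int) (j : Int) (h1 l1 h2 l2 : Int) :
    pvRun B j (max h1 h2, max l1 l2) = max (pvRun B j (h1, l1)) (pvRun B j (h2, l2)) := by
  unfold pvRun
  rw [pvFold_max]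
  simp [max_comm, max_left_comm]

theorem pvGet_some (B : List Int) (j : Int) (h1 : -(B.length : Int) ≤ j) (h2 : j < (B.length : Int)) :
    PySem.List.pyGet? B j = some ((PySem.List.pyGet? B j).getD 0) := by
  have hr : PySem.Raise.InRange B.length j := by unfold PySem.Raise.InRange; omega
  rcases ho : PySem.List.pyGet? B j with _ | x
  · exact absurd ((PySem.List.pyGet?_eq_none_iff _ _).mp ho) (by simpa using hr)
  · rfl

-- main invariant: on a zero-free scanned range, A at level j equals B's pass from level j
theorem pvMain (B : List Int) (k : Nat) :
    ∀ j : Int, j = -(B.length : Int) + k → j < (B.length : Int) →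
    (∀ m ∈ PySem.List.pyRange (-(B.length : Int) + 1) (j + 1) 1, PySem.List.pyGet? B m ≠ some 0) →
    ∀ a c : Int,
      costD B a j c =
        pvRun B j
          (if a = 0 then 0 else c + |(PySem.List.pyGet? B j).getD 0 - a|,
           if a = 0 then 0 else c + |1 - a|) := by
  induction k with
  | zero =>
    intro j hj hlt _ a c
    have hj' : j = -(B.length : Int) := by omega
    have hget := pvGet_some B j (by omega) hlt
    rw [costD, hget, pvRun_base B j _ (by omega)]
    simp only [hj']
    by_cases ha : a = 0 <;> simp [ha]
  | succ k ih =>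
    intro j hj hlt hz a c
    have hjgt : -(B.length : Int) < j := by omega
    have hget := pvGet_some B j (by omega) hlt
    set bj : Int := (PySem.List.pyGet? B j).getD 0 with hbj
    have hbjne : bj ≠ 0 := by
      intro h0
      exact hz j (by rw [PySem.List.mem_pyRange_one]; omega) (by rw [hget, h0])
    have hz' : ∀ m ∈ PySem.List.pyRange (-(B.length : Int) + 1) ((j - 1) + 1) 1,
        PySem.List.pyGet? B m ≠ some 0 := by
      intro m hm
      exact hz m (by rw [PySem.List.mem_pyRange_one] at hm ⊢; omega)
    rw [costD, hget]
    simp only [if_neg (by omega : ¬ j = -(B.length : Int))]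
    have e1 := ih (j - 1) (by omega) (by omega) hz' bj (if a ≠ 0 then c + |bj - a| else 0)
    have e2 := ih (j - 1) (by omega) (by omega) hz' 1 (if a ≠ 0 then c + |1 - a| else 0)
    simp only [if_neg hbjne, one_ne_zero, if_false, sub_self, abs_zero, add_zero] at e1 e2
    rw [e1, e2, pvRun_step B j _ hjgt]
    have hst : pvStepB B
        (if a = 0 then 0 else c + |bj - a|, if a = 0 then 0 else c + |1 - a|) j =
        (max ((if a ≠ 0 then c + |bj - a| else 0) + |(PySem.List.pyGet? B (j - 1)).getD 0 - bj|)
             ((if a ≠ 0 then c + |1 - a| else 0) + |(PySem.List.pyGet? B (j - 1)).getD 0 - 1|),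
         max ((if a ≠ 0 then c + |bj - a| else 0) + |1 - bj|)
             (if a ≠ 0 then c + |1 - a| else 0)) := by
      simp only [pvStepB, ← hbj]
      by_cases ha : a = 0 <;> simp [ha]
    rw [hst, pvRun_max]

-- ===== VERDICT (by name: the statement is the Claim_ definition above) =====
theorem costD_spec : Claim_equal_costD := by
  intro B A_prev i cost _ hpre
  obtain ⟨⟨h1, h2⟩, hz⟩ := hpre
  unfold Spec_costD
  have hk : i = -(B.length : Int) + ((i + B.length).toNat : Int) := by omega
  have hmain := pvMain B (i + B.length).toNat i hk h2 hz A_prev cost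
  rw [hmain]
  simp only [costD_alt, pvRun]
  by_cases ha : A_prev = 0 <;> simp [ha]
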